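-- pv_equiv track=rewrite | github.com/ajif/dithergb | kd.py | linearScale
-- ===== SOURCE A (Python) =====
-- def linearScale(pixel_array, int_scale):
-- 	new_array = []
-- 	for row in pixel_array:
-- 		new_row = []
-- 		for pixel in row:
-- 			for i in range(int_scale):
-- 				new_row.append(pixel)
-- 		for i in range(int_scale):
-- 			new_array.append(new_row)
-- 	return new_array
-- ===== SOURCE B (Python) =====
-- def linearScale(pixel_array, int_scale):
--     return [[pixel_array[y // int_scale][x // int_scale]
--              for x in range(len(pixel_array[y // int_scale]) * int_scale)]
--             for y in range(len(pixel_array) * int_scale)]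
-- ===== Notes on version B (the rewrite author's own statement) =====
-- stated objective: alternative
-- what changed: B computes the output by index mapping over output coordinates (source pixel found by integer division y//scale, x//scale) instead of A's nested replication via repeated appends; B also returns independent row objects where A aliases each scaled row.
import Mathlib
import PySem

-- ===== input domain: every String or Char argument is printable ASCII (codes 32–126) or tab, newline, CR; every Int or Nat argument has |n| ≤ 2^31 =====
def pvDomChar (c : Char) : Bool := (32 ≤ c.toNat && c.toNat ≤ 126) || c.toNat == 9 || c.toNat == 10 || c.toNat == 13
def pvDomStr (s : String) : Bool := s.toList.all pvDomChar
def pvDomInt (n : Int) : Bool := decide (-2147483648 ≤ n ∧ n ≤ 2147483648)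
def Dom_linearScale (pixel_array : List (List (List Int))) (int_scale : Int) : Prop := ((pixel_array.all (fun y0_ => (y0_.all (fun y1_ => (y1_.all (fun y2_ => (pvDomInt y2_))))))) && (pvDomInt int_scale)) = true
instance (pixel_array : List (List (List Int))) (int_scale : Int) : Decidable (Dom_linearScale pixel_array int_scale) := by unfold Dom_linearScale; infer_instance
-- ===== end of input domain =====

-- B rebuilds the output by index mapping over output coordinates (y//scale, x//scale)
-- instead of A's nested replication via repeated appends; return values proved equal.
-- (A aliases each scaled row object; B builds independent rows — invisible to value equality.)

-- ===== PORT A =====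
def linearScale (pixel_array : List (List (List Int))) (int_scale : Int) : List (List (List Int)) :=
  pixel_array.foldl (fun new_array row =>
    let new_row := row.foldl (fun nr pixel =>
      (PySem.List.pyRange 0 int_scale 1).foldl (fun nr _ => nr ++ [pixel]) nr) []
    (PySem.List.pyRange 0 int_scale 1).foldl (fun na _ => na ++ [new_row]) new_array) []

-- ===== PORT B =====
-- pyGetD with default [] is exact here: both indices are provably in range on every input
-- (y < len*scale ⇒ y//scale < len, likewise for x), so the Python indexing never raises.
def linearScale_alt (pixel_array : List (List (List Int))) (int_scale : Int) : List (List (List Int)) :=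
  (PySem.List.pyRange 0 ((pixel_array.length : Int) * int_scale) 1).map (fun y =>
    let row := PySem.List.pyGetD pixel_array (PySem.Int.floordiv y int_scale) []
    (PySem.List.pyRange 0 ((row.length : Int) * int_scale) 1).map (fun x =>
      PySem.List.pyGetD row (PySem.Int.floordiv x int_scale) []))

-- ===== PRECONDITION & SPEC =====
def Spec_linearScale (pixel_array : List (List (List Int))) (int_scale : Int) (out : List (List (List Int))) : Prop := out = linearScale_alt pixel_array int_scale
instance (pixel_array : List (List (List Int))) (int_scale : Int) (out : List (List (List Int))) : Decidable (Spec_linearScale pixel_array int_scale out) := by unfold Spec_linearScale; infer_instance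

-- ===== CLAIM (what is proved, stated in full; the proofs are below) =====
def Claim_equal_linearScale : Prop := ∀ (pixel_array : List (List (List Int))) (int_scale : Int), Dom_linearScale pixel_array int_scale → Spec_linearScale pixel_array int_scale (linearScale pixel_array int_scale)

-- ===== LEMMAS AND PROOFS =====

theorem foldl_congr' {α β : Type} {f g : β → α → β} (l : List α) (acc : β)
    (h : ∀ b a, a ∈ l → f b a = g b a) : l.foldl f acc = l.foldl g acc := by
  induction l generalizing acc with
  | nil => rfl
  | cons x t ih =>
    rw [List.foldl_cons, List.foldl_cons, h _ _ (List.mem_cons_self), ih]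
    intro b a ha; exact h b a (List.mem_cons_of_mem _ ha)

-- appending a constant once per element of a length-m range = appending m copies
theorem fold_rep {α : Type} (s : Int) (x : α) (acc : List α) :
    (PySem.List.pyRange 0 s 1).foldl (fun a _ => a ++ [x]) acc
      = acc ++ List.replicate s.toNat x := by
  rw [PySem.List.foldl_append_singleton_eq_map (f := fun _ => x)]
  simp [PySem.List.length_pyRange_one]

-- an append-accumulating fold is a flatMap
theorem foldl_append_eq_flatMap' {α β : Type} (l : List α) (g : α → List β) (acc : List β) :
    l.foldl (fun a x => a ++ g x) acc = acc ++ l.flatMap g := by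
  induction l generalizing acc with
  | nil => simp
  | cons y ys ih => simp [List.foldl_cons, ih, List.flatMap_cons]

-- A in closed form
theorem linearScale_eq (pa : List (List (List Int))) (s : Int) :
    linearScale pa s
      = pa.flatMap (fun row =>
          List.replicate s.toNat (row.flatMap (fun p => List.replicate s.toNat p))) := by
  unfold linearScale
  have hrow : ∀ (row : List (List Int)),
      row.foldl (fun nr pixel =>
        (PySem.List.pyRange 0 s 1).foldl (fun nr _ => nr ++ [pixel]) nr) []
        = row.flatMap (fun p => List.replicate s.toNat p) := by
    intro row
    have h1 : row.foldl (fun nr pixel =>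
        (PySem.List.pyRange 0 s 1).foldl (fun nr _ => nr ++ [pixel]) nr) []
        = row.foldl (fun nr pixel => nr ++ List.replicate s.toNat pixel) [] :=
      foldl_congr' _ _ (fun a b _ => fold_rep s b a)
    rw [h1, foldl_append_eq_flatMap']; simp
  have h2 : pa.foldl (fun new_array row =>
      let new_row := row.foldl (fun nr pixel =>
        (PySem.List.pyRange 0 s 1).foldl (fun nr _ => nr ++ [pixel]) nr) []
      (PySem.List.pyRange 0 s 1).foldl (fun na _ => na ++ [new_row]) new_array) []
      = pa.foldl (fun na row =>
          na ++ List.replicate s.toNat (row.flatMap (fun p => List.replicate s.toNat p))) [] := by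
    apply foldl_congr'
    intro a b _
    simp only [hrow b]
    exact fold_rep s _ a
  rw [h2, foldl_append_eq_flatMap']; simp

-- index-mapping over m*n output positions = m blocks of n copies
theorem blockMap {α : Type} (m n : ℕ) (g : ℕ → α) (hn : 0 < n) :
    (List.range (m * n)).map (fun y => g (y / n))
      = (List.range m).flatMap (fun i => List.replicate n (g i)) := by
  induction m with
  | zero => simp
  | succ m ih =>
    have h1 : (m + 1) * n = m * n + n := by ring
    rw [h1, List.range_add, List.map_append, ih, List.range_succ, List.flatMap_append]
    congr 1
    rw [List.map_map]
    simp only [Function.comp_def]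
    have hv : ∀ j ∈ List.range n, g ((m * n + j) / n) = (fun _ => g m) j := by
      intro j hj
      simp only [List.mem_range] at hj
      have : (m * n + j) / n = m := by
        rw [Nat.add_comm, Nat.add_mul_div_right _ _ hn, Nat.div_eq_of_lt hj, Nat.zero_add]
      rw [this]
    rw [List.map_congr_left hv]
    simp [List.flatMap_cons]

-- (range len).map of a getD-composed function = map over the list itself
theorem map_range_getD {α β : Type} [Inhabited α] (xs : List α) (d : α) (q : α → β) :
    (List.range xs.length).map (fun i => q (xs.getD i d)) = xs.map q := by
  induction xs with
  | nil => simp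
  | cons x t ih =>
    rw [List.length_cons, List.range_succ_eq_map, List.map_cons, List.map_map]
    simp only [List.getD_cons_zero, List.map_cons]
    refine congrArg (q x :: ·) ?_
    rw [← ih]
    exact List.map_congr_left (fun i _ => by simp)

-- pyRange over Int output coordinates, as blocks
theorem mapRangeInt {α : Type} (m n : ℕ) (hn : 0 < n) (F : Int → α) (g : ℕ → α)
    (h : ∀ k : ℕ, F ((k : ℕ) : Int) = g (k / n)) :
    (PySem.List.pyRange 0 ((m : Int) * (n : Int)) 1).map F
      = (List.range m).flatMap (fun i => List.replicate n (g i)) := by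
  rw [PySem.List.pyRange_one]
  have hcast : (((m : Int) * (n : Int)) - 0).toNat = m * n := by omega
  rw [hcast, List.map_map]
  simp only [Function.comp_def, zero_add]
  have hv : ∀ k ∈ List.range (m * n), F ((k : ℕ) : Int) = (fun y => g (y / n)) k := by
    intro k _; exact h k
  rw [List.map_congr_left hv, blockMap _ _ _ hn]

-- B in the same closed form
theorem linearScale_alt_eq (pa : List (List (List Int))) (s : Int) :
    linearScale_alt pa s
      = pa.flatMap (fun row =>
          List.replicate s.toNat (row.flatMap (fun p => List.replicate s.toNat p))) := by
  unfold linearScale_alt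
  by_cases hs : s ≤ 0
  · have h0 : (pa.length : Int) * s ≤ 0 := mul_nonpos_of_nonneg_of_nonpos (by positivity) hs
    rw [PySem.List.pyRange_one_eq_nil (by omega)]
    have hz : s.toNat = 0 := by omega
    simp [hz]
  · rw [not_le] at hs
    obtain ⟨n, rfl⟩ : ∃ n : ℕ, s = (n : Int) := ⟨s.toNat, by omega⟩
    have hnpos : 0 < n := by exact_mod_cast hs
    have htn : ((n : Int)).toNat = n := by omega
    have hrow : ∀ (row : List (List Int)),
        (PySem.List.pyRange 0 ((row.length : Int) * (n : Int)) 1).map (fun x =>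
            PySem.List.pyGetD row (PySem.Int.floordiv x (n : Int)) [])
          = (List.range row.length).flatMap (fun i => List.replicate n (row.getD i [])) := by
      intro row
      apply mapRangeInt row.length n hnpos
      intro k
      rw [PySem.Int.floordiv_natCast, PySem.List.pyGetD_natCast]
    have hblk : ∀ (row : List (List Int)),
        (List.range row.length).flatMap (fun i => List.replicate n (row.getD i []))
          = row.flatMap (fun p => List.replicate n p) := by
      intro row
      rw [List.flatMap_def, List.flatMap_def,
        map_range_getD row ([] : List Int) (fun p => List.replicate n p)]
    have houter :
        (PySem.List.pyRange 0 ((pa.length : Int) * (n : Int)) 1).map (fun y =>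
            let row := PySem.List.pyGetD pa (PySem.Int.floordiv y (n : Int)) []
            (PySem.List.pyRange 0 ((row.length : Int) * (n : Int)) 1).map (fun x =>
              PySem.List.pyGetD row (PySem.Int.floordiv x (n : Int)) []))
          = (List.range pa.length).flatMap (fun i =>
              List.replicate n ((pa.getD i []).flatMap (fun p => List.replicate n p))) := by
      apply mapRangeInt pa.length n hnpos
      intro k
      simp only [PySem.Int.floordiv_natCast, PySem.List.pyGetD_natCast]
      rw [hrow, hblk]
    rw [houter, htn]
    have hflat : (List.range pa.length).flatMap (fun i =>
        List.replicate n ((pa.getD i []).flatMap (fun p => List.replicate n p)))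
        = pa.flatMap (fun row => List.replicate n (row.flatMap (fun p => List.replicate n p))) := by
      rw [List.flatMap_def, List.flatMap_def,
        map_range_getD pa ([] : List (List Int))
          (fun row => List.replicate n (row.flatMap (fun p => List.replicate n p)))]
    rw [hflat]

-- ===== VERDICT (by name: the statement is the Claim_ definition above) =====
theorem linearScale_spec : Claim_equal_linearScale := by
  intro pa s _
  unfold Spec_linearScale
  rw [linearScale_eq, linearScale_alt_eq]
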